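-- pv_equiv track=rewrite | github.com/X-PG13/agent-security-sandbox | scripts/audit_benchmark.py | audit_attack_types
-- ===== SOURCE A (Python) =====
-- from collections import Counter
--
-- KNOWN_ATTACK_TYPES = {
--     "goal_hijacking", "data_exfiltration", "privilege_escalation",
--     "social_engineering", "adaptive", "denial_of_service",
--     "multistep", "evasion", "encoding", "tool_output_manipulation",
--     "rag_poisoning", "multilingual",
-- }
--
-- def audit_attack_types(cases):
--     """Check attack type distribution."""
--     attack_types = Counter()
--     unknown_types = set()
--     for c in cases:
--         if c.get("type") == "attack":
--             at = c.get("attack_type", "MISSING")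
--             attack_types[at] += 1
--             if at not in KNOWN_ATTACK_TYPES and at != "MISSING":
--                 unknown_types.add(at)
--     return attack_types, unknown_types
-- ===== SOURCE B (Python) =====
-- from collections import Counter
--
-- KNOWN_ATTACK_TYPES = {
--     "goal_hijacking", "data_exfiltration", "privilege_escalation",
--     "social_engineering", "adaptive", "denial_of_service",
--     "multistep", "evasion", "encoding", "tool_output_manipulation",
--     "rag_poisoning", "multilingual",
-- }
--
-- def audit_attack_types(cases):
--     """Check attack type distribution."""
--     ats = [c.get("attack_type", "MISSING") for c in cases if c.get("type") == "attack"]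
--     order = list(dict.fromkeys(ats))  # distinct types, first-occurrence order
--     attack_types = Counter({t: ats.count(t) for t in order})
--     unknown_types = {t for t in order if t not in KNOWN_ATTACK_TYPES and t != "MISSING"}
--     return attack_types, unknown_types
-- ===== Notes on version B (the rewrite author's own statement) =====
-- stated objective: alternative
-- what changed: A's single loop that increments a counter and grows the unknown set per occurrence is replaced by: extract the attack-type list, dedup it to the distinct keys in first-occurrence order, then build the Counter by one .count() scan per distinct key and the unknown set by filtering the distinct keys; no incremental counting at all.
import Mathlib
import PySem

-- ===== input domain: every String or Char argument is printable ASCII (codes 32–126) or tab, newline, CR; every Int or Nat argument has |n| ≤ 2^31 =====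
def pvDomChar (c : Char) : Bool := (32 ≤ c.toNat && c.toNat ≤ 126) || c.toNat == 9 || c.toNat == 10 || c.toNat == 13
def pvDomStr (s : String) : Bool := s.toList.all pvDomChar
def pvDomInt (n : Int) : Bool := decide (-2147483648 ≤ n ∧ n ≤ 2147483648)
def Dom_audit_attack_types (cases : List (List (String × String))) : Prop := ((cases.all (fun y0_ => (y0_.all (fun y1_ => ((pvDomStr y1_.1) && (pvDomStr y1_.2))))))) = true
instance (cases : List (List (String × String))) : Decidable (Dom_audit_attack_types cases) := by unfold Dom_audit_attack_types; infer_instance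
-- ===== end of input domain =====

-- B replaces A's per-occurrence counting-and-collecting loop by: extract the attack-type list,
-- dedup it to the distinct keys, then one .count() scan per distinct key for the Counter and a
-- filter of the distinct keys for the unknown set (alternative decomposition, no incremental counting).

-- module constant KNOWN_ATTACK_TYPES (a Python set literal; distinct strings in order)
def pvKnownAttackTypes : PySem.Set String :=
  ["goal_hijacking", "data_exfiltration", "privilege_escalation",
   "social_engineering", "adaptive", "denial_of_service",
   "multistep", "evasion", "encoding", "tool_output_manipulation",
   "rag_poisoning", "multilingual"]

-- ===== PORT A =====
def audit_attack_types (cases : List (List (String × String))) : (List (String × Int)) × List String :=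
  let r := cases.foldl (fun st c =>
    if (PySem.Dict.mk c).get? "type" == some "attack" then
      let at_ := (PySem.Dict.mk c).getD "attack_type" "MISSING"
      let d := st.1.modify at_ 0 (· + 1)          -- attack_types[at] += 1 (Counter: missing key reads as 0)
      let s := if !pvKnownAttackTypes.contains at_ && at_ != "MISSING"
               then PySem.Set.add st.2 at_ else st.2
      (d, s)
    else st) (PySem.Dict.empty, PySem.Set.empty)
  (r.1.items, r.2)

-- ===== PORT B =====
def audit_attack_types_alt (cases : List (List (String × String))) : (List (String × Int)) × List String :=
  let ats := (cases.filter (fun c => (PySem.Dict.mk c).get? "type" == some "attack")).map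
    (fun c => (PySem.Dict.mk c).getD "attack_type" "MISSING")
  let order := PySem.List.dedup ats                                -- list(dict.fromkeys(ats))
  let attack_types := order.map (fun t => (t, (PySem.List.count ats t : Int)))   -- {t: ats.count(t)}
  let unknown_types := order.filter
    (fun t => !pvKnownAttackTypes.contains t && t != "MISSING")
  (attack_types, unknown_types)

-- ===== PRECONDITION & SPEC =====
def Spec_audit_attack_types (cases : List (List (String × String))) (out : (List (String × Int)) × List String) : Prop := out = audit_attack_types_alt cases
instance (cases : List (List (String × String))) (out : (List (String × Int)) × List String) : Decidable (Spec_audit_attack_types cases out) := by unfold Spec_audit_attack_types; infer_instance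

-- ===== CLAIM (what is proved, stated in full; the proofs are below) =====
def Claim_equal_audit_attack_types : Prop := ∀ (cases : List (List (String × String))), Dom_audit_attack_types cases → Spec_audit_attack_types cases (audit_attack_types cases)

-- ===== LEMMAS AND PROOFS =====

-- a fold that skips non-matching elements and consumes f of the rest is a fold over filter-then-map
theorem pv_foldl_filter_map {α β σ : Type} (q : α → Bool) (f : α → β) (g : σ → β → σ)
    (l : List α) (init : σ) :
    l.foldl (fun st c => if q c then g st (f c) else st) init
      = ((l.filter q).map f).foldl g init := by
  induction l generalizing init with
  | nil => rfl
  | cons a l ih =>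
    by_cases h : q a = true
    · simp [h, ih]
    · simp only [Bool.not_eq_true] at h
      simp [h, ih]

-- conditional Set.add loop from a filtered Nodup seed produces the filter of the update
theorem pv_foldl_cond_add (p : String → Bool) (l : List String) :
    ∀ (S : PySem.Set String), S.Nodup →
      l.foldl (fun s a => if p a then PySem.Set.add s a else s) (S.filter p)
        = (PySem.Set.update S l).filter p := by
  induction l with
  | nil => intro S _; rfl
  | cons a l ih =>
    intro S hS
    have hstep : (if p a then PySem.Set.add (S.filter p) a else S.filter p)
        = (PySem.Set.add S a).filter p := by
      by_cases hmem : a ∈ S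
      · rw [PySem.Set.add_of_mem hmem]
        by_cases hp : p a = true
        · rw [if_pos hp, PySem.Set.add_of_mem (List.mem_filter.mpr ⟨hmem, hp⟩)]
        · simp only [Bool.not_eq_true] at hp
          rw [hp]; simp
      · rw [PySem.Set.add_of_not_mem hmem, List.filter_append, List.filter_cons, List.filter_nil]
        by_cases hp : p a = true
        · have hnm : a ∉ S.filter p := fun h => hmem (List.mem_filter.mp h).1
          rw [if_pos hp, PySem.Set.add_of_not_mem hnm, hp]
          simp
        · simp only [Bool.not_eq_true] at hp
          rw [hp]; simp
    calc (a :: l).foldl (fun s a => if p a then PySem.Set.add s a else s) (S.filter p)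
        = l.foldl (fun s a => if p a then PySem.Set.add s a else s) ((PySem.Set.add S a).filter p) := by
          simp only [List.foldl_cons, hstep]
      _ = (PySem.Set.update (PySem.Set.add S a) l).filter p := ih _ (PySem.Set.nodup_add _ _ hS)
      _ = (PySem.Set.update S (a :: l)).filter p := by rw [PySem.Set.update_cons]

theorem audit_attack_types_eq (cases : List (List (String × String))) :
    audit_attack_types cases = audit_attack_types_alt cases := by
  unfold audit_attack_types audit_attack_types_alt
  set ats : List String :=
    (cases.filter (fun c => (PySem.Dict.mk c).get? "type" == some "attack")).map
      (fun c => (PySem.Dict.mk c).getD "attack_type" "MISSING") with hats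
  have hfold : cases.foldl (fun st c =>
      if (PySem.Dict.mk c).get? "type" == some "attack" then
        ((st.1.modify ((PySem.Dict.mk c).getD "attack_type" "MISSING") 0 (· + 1)),
         (if !pvKnownAttackTypes.contains ((PySem.Dict.mk c).getD "attack_type" "MISSING")
               && ((PySem.Dict.mk c).getD "attack_type" "MISSING") != "MISSING"
          then PySem.Set.add st.2 ((PySem.Dict.mk c).getD "attack_type" "MISSING") else st.2))
      else st) (PySem.Dict.empty, PySem.Set.empty)
      = (PySem.Dict.counter ats,
         (PySem.Set.ofList ats).filter
           (fun a => !pvKnownAttackTypes.contains a && a != "MISSING")) := by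
    rw [pv_foldl_filter_map
      (q := fun c => (PySem.Dict.mk c).get? "type" == some "attack")
      (f := fun c => (PySem.Dict.mk c).getD "attack_type" "MISSING")
      (g := fun (st : PySem.Dict String Int × PySem.Set String) a =>
        (st.1.modify a 0 (· + 1),
         if !pvKnownAttackTypes.contains a && a != "MISSING"
         then PySem.Set.add st.2 a else st.2)),
      PySem.List.foldl_prod_mk
       (f := fun (d : PySem.Dict String Int) a => d.modify a 0 (· + 1))
       (g := fun (s : PySem.Set String) a =>
         if !pvKnownAttackTypes.contains a && a != "MISSING" then PySem.Set.add s a else s)]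
    refine congrArg₂ Prod.mk ?_ ?_
    · rw [PySem.Dict.counter_eq_foldl]
    · have h0 := pv_foldl_cond_add
        (fun a => !pvKnownAttackTypes.contains a && a != "MISSING") ats [] List.nodup_nil
      simpa [PySem.Set.update_nil_left] using h0
  rw [hfold]
  refine congrArg₂ Prod.mk ?_ ?_
  · rw [PySem.Dict.items_counter]
    simp [PySem.List.dedup_eq_ofList, PySem.List.count_eq]
  · simp [PySem.List.dedup_eq_ofList]

-- ===== VERDICT (by name: the statement is the Claim_ definition above) =====
theorem audit_attack_types_spec : Claim_equal_audit_attack_types := by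
  intro cases _
  unfold Spec_audit_attack_types
  exact audit_attack_types_eq cases
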